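-- pv_equiv track=rewrite | github.com/rahmandayub/quran-rag-system | scripts/utils/juz_mapping.py | get_juz_number
-- ===== SOURCE A (Python) =====
-- from typing import Tuple
--
-- JUZ_BOUNDARIES: list[Tuple[int, int, int]] = [
--     (1, 1, 1),      # Juz 1: Al-Fatihah 1
--     (2, 2, 142),    # Juz 2: Al-Baqarah 142
--     (3, 2, 253),    # Juz 3: Al-Baqarah 253
--     (4, 3, 93),     # Juz 4: Ali 'Imran 93
--     (5, 4, 24),     # Juz 5: An-Nisa 24
--     (6, 4, 148),    # Juz 6: An-Nisa 148
--     (7, 5, 82),     # Juz 7: Al-Ma'idah 82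
--     (8, 6, 111),    # Juz 8: Al-An'am 111
--     (9, 7, 88),     # Juz 9: Al-A'raf 88
--     (10, 8, 41),    # Juz 10: Al-Anfal 41
--     (11, 9, 93),    # Juz 11: At-Tawbah 93
--     (12, 11, 6),    # Juz 12: Hud 6
--     (13, 12, 53),   # Juz 13: Yusuf 53
--     (14, 13, 19),   # Juz 14: Ar-Ra'd 19
--     (15, 15, 1),    # Juz 15: Al-Hijr 1
--     (16, 16, 129),  # Juz 16: An-Nahl 129
--     (17, 17, 1),    # Juz 17: Al-Isra 1
--     (18, 18, 75),   # Juz 18: Al-Kahf 75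
--     (19, 21, 1),    # Juz 19: Al-Anbiya 1
--     (20, 22, 79),   # Juz 20: Al-Hajj 79
--     (21, 25, 21),   # Juz 21: Al-Furqan 21
--     (22, 27, 56),   # Juz 22: An-Naml 56
--     (23, 29, 45),   # Juz 23: Al-'Ankabut 45
--     (24, 33, 31),   # Juz 24: Al-Ahzab 31
--     (25, 36, 28),   # Juz 25: Ya-Sin 28
--     (26, 39, 32),   # Juz 26: Az-Zumar 32
--     (27, 41, 47),   # Juz 27: Fussilat 47
--     (28, 48, 1),    # Juz 28: Al-Fath 1
--     (29, 51, 31),   # Juz 29: Adh-Dhariyat 31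
--     (30, 67, 1),    # Juz 30: Al-Mulk 1
-- ]
--
-- def get_juz_number(surah: int, verse: int) -> int:
--     """
--     Calculate juz number based on surah and verse number.
--
--     Uses standard Hafs Quran juz boundaries.
--
--     Args:
--         surah: Surah number (1-114)
--         verse: Verse number within surah
--
--     Returns:
--         Juz number (1-30)
--
--     Raises:
--         ValueError: If surah or verse is out of valid range
--     """
--     if surah < 1 or surah > 114:
--         raise ValueError(f"Invalid surah number: {surah}. Must be 1-114.")
--     if verse < 1:
--         raise ValueError(f"Invalid verse number: {verse}. Must be >= 1.")
--
--     # Find the juz by checking boundaries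
--     juz = 1
--     for i, (juz_num, boundary_surah, boundary_verse) in enumerate(JUZ_BOUNDARIES):
--         # Check if current verse is at or after this boundary
--         if surah > boundary_surah or (surah == boundary_surah and verse >= boundary_verse):
--             juz = juz_num
--         # If we've passed the current surah, stop checking
--         elif boundary_surah > surah:
--             break
--
--     return juz
-- ===== SOURCE B (Python) =====
-- # Same guards as A, then a pure branching decision tree on (surah, verse):
-- # no boundary table and no loop at all.
--
-- def get_juz_number(surah: int, verse: int) -> int:
--     if surah < 1 or surah > 114:
--         raise ValueError(f"Invalid surah number: {surah}. Must be 1-114.")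
--     if verse < 1:
--         raise ValueError(f"Invalid verse number: {verse}. Must be >= 1.")
--     if surah >= 67: return 30
--     if surah >= 52: return 29
--     if surah == 51: return 29 if verse >= 31 else 28
--     if surah >= 48: return 28
--     if surah >= 42: return 27
--     if surah == 41: return 27 if verse >= 47 else 26
--     if surah == 40: return 26
--     if surah == 39: return 26 if verse >= 32 else 25
--     if surah >= 37: return 25
--     if surah == 36: return 25 if verse >= 28 else 24
--     if surah >= 34: return 24
--     if surah == 33: return 24 if verse >= 31 else 23
--     if surah >= 30: return 23
--     if surah == 29: return 23 if verse >= 45 else 22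
--     if surah == 28: return 22
--     if surah == 27: return 22 if verse >= 56 else 21
--     if surah == 26: return 21
--     if surah == 25: return 21 if verse >= 21 else 20
--     if surah >= 23: return 20
--     if surah == 22: return 20 if verse >= 79 else 19
--     if surah == 21: return 19
--     if surah >= 19: return 18
--     if surah == 18: return 18 if verse >= 75 else 17
--     if surah == 17: return 17
--     if surah == 16: return 16 if verse >= 129 else 15
--     if surah == 15: return 15
--     if surah == 14: return 14
--     if surah == 13: return 14 if verse >= 19 else 13
--     if surah == 12: return 13 if verse >= 53 else 12
--     if surah == 11: return 12 if verse >= 6 else 11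
--     if surah == 10: return 11
--     if surah == 9: return 11 if verse >= 93 else 10
--     if surah == 8: return 10 if verse >= 41 else 9
--     if surah == 7: return 9 if verse >= 88 else 8
--     if surah == 6: return 8 if verse >= 111 else 7
--     if surah == 5: return 7 if verse >= 82 else 6
--     if surah == 4:
--         if verse >= 148: return 6
--         if verse >= 24: return 5
--         return 4
--     if surah == 3: return 4 if verse >= 93 else 3
--     if surah == 2:
--         if verse >= 253: return 3
--         if verse >= 142: return 2
--         return 1
--     return 1
-- ===== Notes on version B (the rewrite author's own statement) =====
-- stated objective: alternative
-- what changed: Replaces A's linear scan over the 30-entry juz boundary table (tracking the last matching boundary, with an early break) by a table-free branching decision tree on surah then verse.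
import Mathlib
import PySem

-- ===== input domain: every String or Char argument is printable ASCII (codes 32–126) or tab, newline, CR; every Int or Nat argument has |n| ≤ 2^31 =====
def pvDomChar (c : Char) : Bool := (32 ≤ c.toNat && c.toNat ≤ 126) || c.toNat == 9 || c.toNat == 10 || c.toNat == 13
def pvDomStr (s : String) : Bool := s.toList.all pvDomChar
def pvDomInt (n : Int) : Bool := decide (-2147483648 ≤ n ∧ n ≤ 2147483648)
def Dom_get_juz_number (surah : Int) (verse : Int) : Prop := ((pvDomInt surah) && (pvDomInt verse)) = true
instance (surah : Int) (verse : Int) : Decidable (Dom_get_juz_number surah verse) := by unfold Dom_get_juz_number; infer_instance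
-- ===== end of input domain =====

-- B replaces A's linear scan of the juz boundary table by a table-free
-- branching decision tree on (surah, verse) (alternative algorithm, same values).


-- ===== PORT A =====
def JUZ_BOUNDARIES : List (Int × Int × Int) :=
  [(1, 1, 1), (2, 2, 142), (3, 2, 253), (4, 3, 93), (5, 4, 24), (6, 4, 148),
   (7, 5, 82), (8, 6, 111), (9, 7, 88), (10, 8, 41), (11, 9, 93), (12, 11, 6),
   (13, 12, 53), (14, 13, 19), (15, 15, 1), (16, 16, 129), (17, 17, 1),
   (18, 18, 75), (19, 21, 1), (20, 22, 79), (21, 25, 21), (22, 27, 56),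
   (23, 29, 45), (24, 33, 31), (25, 36, 28), (26, 39, 32), (27, 41, 47),
   (28, 48, 1), (29, 51, 31), (30, 67, 1)]

-- A's for-loop with its `elif … break`, as structural recursion over the list
def juzLoopA (surah verse : Int) : List (Int × Int × Int) → Int → Int
  | [], juz => juz
  | (jn, bs, bv) :: rest, juz =>
    if surah > bs ∨ (surah = bs ∧ verse ≥ bv) then juzLoopA surah verse rest jn
    else if bs > surah then juz
    else juzLoopA surah verse rest juz

-- the two `raise ValueError` branches are excluded by Pre_; the port returns 0 there
def get_juz_number (surah : Int) (verse : Int) : Int :=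
  if surah < 1 ∨ surah > 114 then 0
  else if verse < 1 then 0
  else juzLoopA surah verse JUZ_BOUNDARIES 1

-- ===== PORT B =====
-- Source B's if-chain decision tree, transliterated branch for branch
def get_juz_number_alt (surah : Int) (verse : Int) : Int :=
  if surah < 1 ∨ surah > 114 then 0
  else if verse < 1 then 0
  else if surah ≥ 67 then 30
  else if surah ≥ 52 then 29
  else if surah = 51 then (if verse ≥ 31 then 29 else 28)
  else if surah ≥ 48 then 28
  else if surah ≥ 42 then 27
  else if surah = 41 then (if verse ≥ 47 then 27 else 26)
  else if surah = 40 then 26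
  else if surah = 39 then (if verse ≥ 32 then 26 else 25)
  else if surah ≥ 37 then 25
  else if surah = 36 then (if verse ≥ 28 then 25 else 24)
  else if surah ≥ 34 then 24
  else if surah = 33 then (if verse ≥ 31 then 24 else 23)
  else if surah ≥ 30 then 23
  else if surah = 29 then (if verse ≥ 45 then 23 else 22)
  else if surah = 28 then 22
  else if surah = 27 then (if verse ≥ 56 then 22 else 21)
  else if surah = 26 then 21
  else if surah = 25 then (if verse ≥ 21 then 21 else 20)
  else if surah ≥ 23 then 20
  else if surah = 22 then (if verse ≥ 79 then 20 else 19)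
  else if surah = 21 then 19
  else if surah ≥ 19 then 18
  else if surah = 18 then (if verse ≥ 75 then 18 else 17)
  else if surah = 17 then 17
  else if surah = 16 then (if verse ≥ 129 then 16 else 15)
  else if surah = 15 then 15
  else if surah = 14 then 14
  else if surah = 13 then (if verse ≥ 19 then 14 else 13)
  else if surah = 12 then (if verse ≥ 53 then 13 else 12)
  else if surah = 11 then (if verse ≥ 6 then 12 else 11)
  else if surah = 10 then 11
  else if surah = 9 then (if verse ≥ 93 then 11 else 10)
  else if surah = 8 then (if verse ≥ 41 then 10 else 9)
  else if surah = 7 then (if verse ≥ 88 then 9 else 8)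
  else if surah = 6 then (if verse ≥ 111 then 8 else 7)
  else if surah = 5 then (if verse ≥ 82 then 7 else 6)
  else if surah = 4 then (if verse ≥ 148 then 6 else if verse ≥ 24 then 5 else 4)
  else if surah = 3 then (if verse ≥ 93 then 4 else 3)
  else if surah = 2 then (if verse ≥ 253 then 3 else if verse ≥ 142 then 2 else 1)
  else 1

-- ===== PRECONDITION & SPEC =====
-- Pre_ excludes exactly the inputs on which A raises ValueError (surah outside 1..114, or verse < 1)
def Pre_get_juz_number (surah : Int) (verse : Int) : Prop :=
  1 ≤ surah ∧ surah ≤ 114 ∧ 1 ≤ verse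
instance (surah : Int) (verse : Int) : Decidable (Pre_get_juz_number surah verse) := by
  unfold Pre_get_juz_number; infer_instance
def pvWitness_get_juz_number : Int × Int := (2, 142)

def Spec_get_juz_number (surah : Int) (verse : Int) (out : Int) : Prop := out = get_juz_number_alt surah verse
instance (surah : Int) (verse : Int) (out : Int) : Decidable (Spec_get_juz_number surah verse out) := by unfold Spec_get_juz_number; infer_instance

-- ===== CLAIM (what is proved, stated in full; the proofs are below) =====
def Claim_equal_get_juz_number : Prop := ∀ (surah : Int) (verse : Int), Dom_get_juz_number surah verse → Pre_get_juz_number surah verse → Spec_get_juz_number surah verse (get_juz_number surah verse)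

-- ===== LEMMAS AND PROOFS =====

-- ===== VERDICT (by name: the statement is the Claim_ definition above) =====
set_option maxHeartbeats 4000000 in
theorem get_juz_number_spec : Claim_equal_get_juz_number := by
  intro surah verse _hdom hpre
  obtain ⟨h1, h2, h3⟩ := hpre
  unfold Spec_get_juz_number get_juz_number get_juz_number_alt
  interval_cases surah <;>
    simp [juzLoopA, JUZ_BOUNDARIES] <;>
    (try split_ifs) <;> omega
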